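-- pv_equiv track=rewrite | github.com/TylerLeite/mixobot | drinks.py | identify_nuclei
-- ===== SOURCE A (Python) =====
-- def key(a, b):
--   if a > b:
--     a, b = b, a
--
--   return a + '.' + b
--
-- def identify_nuclei(graph, ingredient_list, n=20):
--   scores = []
--
--   for a in ingredient_list:
--     acc = 0
--     for b in ingredient_list:
--       if a == b:
--         continue
--       else:
--         acc += graph[key(a, b)]
--     scores.append({
--       'name': a,
--       'score': acc,
--     })
--
--   scores.sort(reverse=True, key=lambda x: x['score'])
--   return [s['name'] for s in scores[:n]]
-- ===== SOURCE B (Python) =====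
-- def key(a, b):
--   if a > b:
--     a, b = b, a
--   return a + '.' + b
--
-- def identify_nuclei(graph, ingredient_list, n=20):
--   # Single reversed pass: each element is paired once against the already-seen
--   # suffix, adding the looked-up weight to BOTH partners (one lookup per pair).
--   rev = []
--   for h in reversed(ingredient_list):
--     s = 0
--     for e in rev:
--       if e[0] != h:
--         w = graph[key(h, e[0])]
--         s += w
--         e[1] += w
--     rev.append([h, s])
--   rev.reverse()
--   rev.sort(reverse=True, key=lambda e: e[1])
--   return [e[0] for e in rev[:n]]
-- ===== Notes on version B (the rewrite author's own statement) =====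
-- stated objective: alternative
-- what changed: Replaces the nested full-list rescan per ingredient by a single reversed pass that processes each unordered pair once, adding the looked-up weight to both partners' accumulators, then reverses, sorts and slices as before.
import Mathlib
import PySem

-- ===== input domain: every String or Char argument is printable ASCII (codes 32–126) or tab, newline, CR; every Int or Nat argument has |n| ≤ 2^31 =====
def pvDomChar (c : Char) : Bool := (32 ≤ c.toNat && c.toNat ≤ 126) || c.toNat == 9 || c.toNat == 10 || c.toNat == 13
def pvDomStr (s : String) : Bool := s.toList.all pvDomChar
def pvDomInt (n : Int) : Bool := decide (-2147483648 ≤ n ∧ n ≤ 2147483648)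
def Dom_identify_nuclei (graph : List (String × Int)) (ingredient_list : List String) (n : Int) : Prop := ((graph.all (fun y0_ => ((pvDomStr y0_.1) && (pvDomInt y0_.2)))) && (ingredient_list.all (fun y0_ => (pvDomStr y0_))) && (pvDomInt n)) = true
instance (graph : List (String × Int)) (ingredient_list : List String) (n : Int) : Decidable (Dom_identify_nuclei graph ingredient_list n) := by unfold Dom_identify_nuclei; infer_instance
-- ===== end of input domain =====

-- B processes each unordered pair once (one reversed pass, crediting both partners) instead of
-- A's full inner rescan per ingredient; same scores, same stable reverse sort, same top-n names.

-- ===== PORT A =====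
-- helper `key` from the module (shared by both Pythons); Python's string '>' is
-- lexicographic comparison of code points, ported by hand over List Char (exact for all strings)
def pvLtChars : List Char → List Char → Bool
  | _, [] => false
  | [], _ :: _ => true
  | a :: as, b :: bs =>
      if a.toNat < b.toNat then true
      else if b.toNat < a.toNat then false
      else pvLtChars as bs

def pvKey (a b : String) : String :=
  if pvLtChars b.toList a.toList then b ++ "." ++ a else a ++ "." ++ b

def identify_nuclei (graph : List (String × Int)) (ingredient_list : List String) (n : Int) : List String :=
  let d := PySem.Dict.mk graph
  let scores : List (String × Int) :=
    ingredient_list.foldl (fun sc a =>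
      sc ++ [(a, ingredient_list.foldl
        (fun acc b => if a == b then acc else acc + ((d.get? (pvKey a b)).getD 0)) 0)]) []
  let sortedScores := PySem.List.sorted scores (fun x => x.2) true
  (PySem.List.slice sortedScores none (some n)).map (fun s => s.1)

-- ===== PORT B =====
def identify_nuclei_alt (graph : List (String × Int)) (ingredient_list : List String) (n : Int) : List String :=
  let d := PySem.Dict.mk graph
  let rev : List (String × Int) :=
    ingredient_list.reverse.foldl (fun rev h =>
      let p := rev.foldl (fun (q : Int × List (String × Int)) e =>
          if e.1 != h then
            let wv := (d.get? (pvKey h e.1)).getD 0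
            (q.1 + wv, q.2 ++ [(e.1, e.2 + wv)])
          else (q.1, q.2 ++ [e])) ((0 : Int), ([] : List (String × Int)))
      p.2 ++ [(h, p.1)]) []
  let scores := rev.reverse
  let sortedScores := PySem.List.sorted scores (fun x => x.2) true
  (PySem.List.slice sortedScores none (some n)).map (fun s => s.1)

-- ===== PRECONDITION & SPEC =====
-- Pre_ excludes exactly the inputs on which A raises KeyError: some pair of distinct
-- ingredient values whose (sorted, dot-joined) key is absent from graph.
def Pre_identify_nuclei (graph : List (String × Int)) (ingredient_list : List String) (n : Int) : Prop :=
  ∀ a ∈ ingredient_list, ∀ b ∈ ingredient_list, a ≠ b →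
    ((PySem.Dict.mk graph).get? (pvKey a b)).isSome = true
instance (graph : List (String × Int)) (ingredient_list : List String) (n : Int) : Decidable (Pre_identify_nuclei graph ingredient_list n) := by unfold Pre_identify_nuclei; infer_instance

def pvWitness_identify_nuclei : (List (String × Int)) × List String × Int :=
  ([("a.b", 3)], ["a", "b"], 20)

def Spec_identify_nuclei (graph : List (String × Int)) (ingredient_list : List String) (n : Int) (out : List String) : Prop := out = identify_nuclei_alt graph ingredient_list n
instance (graph : List (String × Int)) (ingredient_list : List String) (n : Int) (out : List String) : Decidable (Spec_identify_nuclei graph ingredient_list n out) := by unfold Spec_identify_nuclei; infer_instance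

-- ===== CLAIM (what is proved, stated in full; the proofs are below) =====
def Claim_equal_identify_nuclei : Prop := ∀ (graph : List (String × Int)) (ingredient_list : List String) (n : Int), Dom_identify_nuclei graph ingredient_list n → Pre_identify_nuclei graph ingredient_list n → Spec_identify_nuclei graph ingredient_list n (identify_nuclei graph ingredient_list n)

-- ===== LEMMAS AND PROOFS =====

-- the per-position score both programs compute: sum over the whole list of the
-- weights against value-distinct partners
def pvS (d : PySem.Dict String Int) (a : String) (l : List String) : Int :=
  (l.map (fun b => if a == b then 0 else ((d.get? (pvKey a b)).getD 0))).sum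

theorem pvLt_asymm (x : List Char) : ∀ (y : List Char), pvLtChars x y = true → pvLtChars y x = false := by
  induction x with
  | nil => intro y h; cases y <;> simp [pvLtChars]
  | cons a as ih =>
    intro y h
    cases y with
    | nil => simp [pvLtChars] at h
    | cons b bs =>
      by_cases h1 : a.toNat < b.toNat
      · simp [pvLtChars, h1, show ¬ b.toNat < a.toNat by omega]
      · by_cases h2 : b.toNat < a.toNat
        · simp [pvLtChars, h1, h2] at h
        · simp only [pvLtChars, if_neg h1, if_neg h2] at h
          simp only [pvLtChars, if_neg h2, if_neg h1]
          exact ih bs h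

theorem pvLt_antisymm (x : List Char) : ∀ (y : List Char),
    pvLtChars x y = false → pvLtChars y x = false → x = y := by
  induction x with
  | nil =>
    intro y h _
    cases y with
    | nil => rfl
    | cons b bs => simp [pvLtChars] at h
  | cons a as ih =>
    intro y h h'
    cases y with
    | nil => simp [pvLtChars] at h'
    | cons b bs =>
      by_cases h1 : a.toNat < b.toNat
      · simp [pvLtChars, h1] at h
      · by_cases h2 : b.toNat < a.toNat
        · simp [pvLtChars, h2] at h'
        · have hab : a = b := by
            have ht : a.toNat = b.toNat := Nat.le_antisymm (Nat.not_lt.mp h2) (Nat.not_lt.mp h1)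
            exact Char.ext (UInt32.toNat_inj.mp ht)
          simp only [pvLtChars, if_neg h1, if_neg h2] at h h'
          rw [hab, ih bs h h']

theorem pvKey_comm (a b : String) : pvKey a b = pvKey b a := by
  unfold pvKey
  cases h1 : pvLtChars b.toList a.toList with
  | true => simp [pvLt_asymm _ _ h1]
  | false =>
    cases h2 : pvLtChars a.toList b.toList with
    | true => simp [h1, h2]
    | false =>
      have hab : a = b := String.toList_inj.mp (pvLt_antisymm _ _ h2 h1)
      simp [h1, h2, hab]

theorem pv_inner_foldl (d : PySem.Dict String Int) (a : String) (l : List String) (c : Int) :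
    l.foldl (fun acc b => if a == b then acc else acc + ((d.get? (pvKey a b)).getD 0)) c
      = c + pvS d a l := by
  induction l generalizing c with
  | nil => simp [pvS]
  | cons x t ih =>
      simp only [List.foldl_cons, ih, pvS, List.map_cons, List.sum_cons]
      by_cases h : a == x <;> simp [h] <;> ring

theorem pvA_scores (d : PySem.Dict String Int) (l m : List String) :
    m.foldl (fun sc a =>
      sc ++ [(a, l.foldl (fun acc b => if a == b then acc else acc + ((d.get? (pvKey a b)).getD 0)) 0)]) []
    = m.map (fun a => (a, pvS d a l)) := by
  rw [PySem.List.foldl_append_singleton_eq_map]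
  exact List.map_congr_left (fun a _ => by rw [pv_inner_foldl]; ring_nf)

theorem pvB_loop (d : PySem.Dict String Int) (h : String) (r : List (String × Int))
    (s0 : Int) (out0 : List (String × Int)) :
    r.foldl (fun (q : Int × List (String × Int)) e =>
        if e.1 != h then
          (q.1 + ((d.get? (pvKey h e.1)).getD 0), q.2 ++ [(e.1, e.2 + ((d.get? (pvKey h e.1)).getD 0))])
        else (q.1, q.2 ++ [e])) (s0, out0)
    = (s0 + (r.map (fun e => if e.1 == h then 0 else ((d.get? (pvKey h e.1)).getD 0))).sum,
       out0 ++ r.map (fun e => (e.1, e.2 + if e.1 == h then 0 else ((d.get? (pvKey h e.1)).getD 0)))) := by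
  induction r generalizing s0 out0 with
  | nil => simp
  | cons e t ih =>
      by_cases he : (e.1 == h) = true
      · have hb : (e.1 != h) = false := by simp [bne, he]
        rw [List.foldl_cons]
        simp only [hb, Bool.false_eq_true, if_false]
        rw [ih]
        simp only [List.map_cons, List.sum_cons, he, if_true, List.append_assoc,
          List.singleton_append, zero_add, add_zero, Prod.mk.eta]
      · have he' : (e.1 == h) = false := Bool.eq_false_iff.mpr he
        have hb : (e.1 != h) = true := by simp [bne, he']
        rw [List.foldl_cons]
        simp only [hb, if_true]
        rw [ih]
        simp only [List.map_cons, List.sum_cons, he', Bool.false_eq_true, if_false,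
          List.append_assoc, List.singleton_append, add_assoc]

theorem pvS_cons (d : PySem.Dict String Int) (b h : String) (t : List String) :
    pvS d b (h :: t) = pvS d b t + (if b == h then 0 else ((d.get? (pvKey h b)).getD 0)) := by
  simp only [pvS, List.map_cons, List.sum_cons, pvKey_comm h b]
  ring

theorem pvB_build (d : PySem.Dict String Int) (l : List String) :
    l.foldr (fun h rev =>
      let p := rev.foldl (fun (q : Int × List (String × Int)) e =>
          if e.1 != h then
            let wv := (d.get? (pvKey h e.1)).getD 0
            (q.1 + wv, q.2 ++ [(e.1, e.2 + wv)])
          else (q.1, q.2 ++ [e])) ((0 : Int), ([] : List (String × Int)))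
      p.2 ++ [(h, p.1)]) []
    = (l.map (fun a => (a, pvS d a l))).reverse := by
  induction l with
  | nil => simp
  | cons h t ih =>
      rw [List.foldr_cons, ih]
      dsimp only
      rw [pvB_loop]
      have h1 : ((t.map (fun a => (a, pvS d a t))).reverse.map
          (fun e => (e.1, e.2 + if e.1 == h then 0 else ((d.get? (pvKey h e.1)).getD 0))))
          = (t.map (fun a => (a, pvS d a (h :: t)))).reverse := by
        rw [← List.map_reverse, ← List.map_reverse, List.map_map]
        exact List.map_congr_left (fun b _ => by simp only [Function.comp]; rw [pvS_cons])
      have h2 : ((t.map (fun a => (a, pvS d a t))).reverse.map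
          (fun e => if e.1 == h then 0 else ((d.get? (pvKey h e.1)).getD 0))).sum
          = pvS d h (h :: t) := by
        rw [← List.map_reverse, List.map_map, List.map_reverse, List.sum_reverse, pvS]
        simp only [List.map_cons, List.sum_cons, beq_self_eq_true, if_true, zero_add]
        refine congrArg List.sum (List.map_congr_left (fun b _ => ?_))
        simp only [Function.comp]
        by_cases hb : b = h
        · simp [hb]
        · simp [hb, Ne.symm hb, pvKey_comm h b]
      simp only [List.nil_append, h1, zero_add, h2, List.map_cons, List.reverse_cons]

-- ===== VERDICT (by name: the statement is the Claim_ definition above) =====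
theorem identify_nuclei_spec : Claim_equal_identify_nuclei := by
  intro graph l n _ _
  unfold Spec_identify_nuclei identify_nuclei identify_nuclei_alt
  dsimp only
  rw [List.foldl_reverse]
  rw [pvA_scores, pvB_build, List.reverse_reverse]
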